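-- pv_equiv track=rewrite | github.com/taddeus/advent-of-code | 2022/12_climb.py | parse
-- ===== SOURCE A (Python) =====
-- def parse(content):
--     grid = [ord(x) - ord('a') for x in content if x != '\n']
--     w = content.find('\n')
--     src = grid.index(ord('S') - ord('a'))
--     dst = grid.index(ord('E') - ord('a'))
--     grid[src] = 0
--     grid[dst] = 25
--     return grid, w, src, dst
-- ===== SOURCE B (Python) =====
-- def parse(content):
--     # One explicit pass over enumerate(content): builds the grid, records the
--     # first newline position and the first S/E positions as it goes.
--     grid = []
--     w = -1
--     src = dst = None
--     for i, x in enumerate(content):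
--         if x == '\n':
--             if w < 0:
--                 w = i
--             continue
--         if x == 'S' and src is None:
--             src = len(grid)
--             grid.append(0)
--         elif x == 'E' and dst is None:
--             dst = len(grid)
--             grid.append(25)
--         else:
--             grid.append(ord(x) - ord('a'))
--     if src is None or dst is None:
--         raise ValueError('S or E not in grid')
--     return grid, w, src, dst
-- ===== Notes on version B (the rewrite author's own statement) =====
-- stated objective: alternative
-- what changed: Replaces A's comprehension plus find plus two .index scans (four passes) with one explicit fused loop over enumerate(content) that builds the grid and records the first newline and first S/E positions as it goes.
-- outside the precondition, e.g. on parse('S'): A raises ValueError, B raises ValueError; on parse('E'): A raises ValueError, B raises ValueError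
import Mathlib
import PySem

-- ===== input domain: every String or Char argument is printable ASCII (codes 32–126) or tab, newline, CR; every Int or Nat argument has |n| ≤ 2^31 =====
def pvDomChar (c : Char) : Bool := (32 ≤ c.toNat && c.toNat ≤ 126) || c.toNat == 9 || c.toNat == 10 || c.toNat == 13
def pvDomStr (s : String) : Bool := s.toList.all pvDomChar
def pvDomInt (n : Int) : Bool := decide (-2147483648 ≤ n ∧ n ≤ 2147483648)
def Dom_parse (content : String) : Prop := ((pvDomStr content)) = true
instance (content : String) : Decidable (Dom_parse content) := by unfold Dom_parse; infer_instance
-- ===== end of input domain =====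

-- B fuses A's comprehension + find + two .index scans into one explicit loop over the
-- enumerated characters (alternative decomposition, same O(n) cost).


-- ===== PORT A =====
def parse (content : String) : List Int × Int × Int × Int :=
  let grid := (content.toList.filter (fun x => x != '\n')).map (fun x => ((x.toNat : Int) - 97))
  let w := PySem.Str.find content "\n"
  match PySem.List.index? grid (-14), PySem.List.index? grid (-28) with
  | some src, some dst => ((grid.set src 0).set dst 25, w, (src : Int), (dst : Int))
  | _, _ => ([], 0, 0, 0)   -- grid.index raised ValueError: outside Pre_parse

-- ===== PORT B =====
def buildLoopB : List Char → Nat → List Int → Int → Option Nat → Option Nat →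
    List Int × Int × Option Nat × Option Nat
  | [], _, g, w, s, d => (g, w, s, d)
  | x :: cs, i, g, w, s, d =>
    if x = '\n' then
      buildLoopB cs (i + 1) g (if w < 0 then (i : Int) else w) s d
    else if x = 'S' ∧ s = none then
      buildLoopB cs (i + 1) (g ++ [0]) w (some g.length) d
    else if x = 'E' ∧ d = none then
      buildLoopB cs (i + 1) (g ++ [25]) w s (some g.length)
    else
      buildLoopB cs (i + 1) (g ++ [((x.toNat : Int) - 97)]) w s d

def parse_alt (content : String) : List Int × Int × Int × Int :=
  let (g, w, s, d) := buildLoopB content.toList 0 [] (-1) none none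
  match s with
  | none => ([], 0, 0, 0)   -- raise ValueError: outside Pre_parse
  | some s' =>
    match d with
    | none => ([], 0, 0, 0)   -- raise ValueError: outside Pre_parse
    | some d' => (g, w, (s' : Int), (d' : Int))

-- ===== PRECONDITION & SPEC =====
-- A raises ValueError (grid.index fails) exactly when content has no 'S' or no 'E'; Pre_ excludes those.
def Pre_parse (content : String) : Prop :=
  'S' ∈ content.toList ∧ 'E' ∈ content.toList
instance (content : String) : Decidable (Pre_parse content) := by unfold Pre_parse; infer_instance

def pvWitness_parse : String := "Sab\ncE"

def Spec_parse (content : String) (out : List Int × Int × Int × Int) : Prop := out = parse_alt content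
instance (content : String) (out : List Int × Int × Int × Int) : Decidable (Spec_parse content out) := by unfold Spec_parse; infer_instance

-- ===== CLAIM (what is proved, stated in full; the proofs are below) =====
def Claim_equal_parse : Prop := ∀ (content : String), Dom_parse content → Pre_parse content → Spec_parse content (parse content)

-- ===== LEMMAS AND PROOFS =====

-- spec-side helpers used only by the proofs
def pvF (x : Char) : Int := (x.toNat : Int) - 97

def pvIdx (c : Char) : List Char → Option Nat
  | [] => none
  | x :: cs => if x = '\n' then pvIdx c cs
      else if x = c then some 0 else (pvIdx c cs).map (· + 1)

def pvNL : List Char → Option Nat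
  | [] => none
  | x :: cs => if x = '\n' then some 0 else (pvNL cs).map (· + 1)

def pvG : List Char → Bool → Bool → List Int
  | [], _, _ => []
  | x :: cs, sF, dF =>
    if x = '\n' then pvG cs sF dF
    else if x = 'S' ∧ sF = false then 0 :: pvG cs true dF
    else if x = 'E' ∧ dF = false then 25 :: pvG cs sF true
    else pvF x :: pvG cs sF dF

def pvSetOpt (l : List Int) (o : Option Nat) (v : Int) : List Int :=
  match o with
  | none => l
  | some k => l.set k v

theorem pvSetOpt_none (l : List Int) (v : Int) : pvSetOpt l none v = l := rfl

theorem pvSetOpt_cons_zero (a : Int) (l : List Int) (v : Int) :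
    pvSetOpt (a :: l) (some 0) v = v :: l := by simp [pvSetOpt]

theorem pvSetOpt_cons_map (a : Int) (l : List Int) (o : Option Nat) (v : Int) :
    pvSetOpt (a :: l) (o.map (· + 1)) v = a :: pvSetOpt l o v := by
  cases o <;> simp [pvSetOpt]

theorem pvF_eq_S (x : Char) : pvF x = -14 ↔ x = 'S' := by
  constructor
  · intro h
    have h83 : x.toNat = 83 := by unfold pvF at h; omega
    have := Char.ofNat_toNat x
    rw [h83] at this
    exact this.symm
  · intro h; subst h; decide

theorem pvF_eq_E (x : Char) : pvF x = -28 ↔ x = 'E' := by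
  constructor
  · intro h
    have h69 : x.toNat = 69 := by unfold pvF at h; omega
    have := Char.ofNat_toNat x
    rw [h69] at this
    exact this.symm
  · intro h; subst h; decide

theorem pvIdx_eq_index?_S (cs : List Char) :
    pvIdx 'S' cs = PySem.List.index? ((cs.filter (fun x => x != '\n')).map pvF) (-14) := by
  induction cs with
  | nil => simp [pvIdx]
  | cons x cs ih =>
    by_cases hnl : x = '\n'
    · subst hnl; simpa [pvIdx] using ih
    · by_cases hS : x = 'S'
      · subst hS
        rw [pvIdx, if_neg (by decide), if_pos rfl]
        rw [List.filter_cons, if_pos (by decide), List.map_cons]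
        have h14 : pvF 'S' = -14 := by decide
        rw [h14, PySem.List.index?_cons_self]
      · have hne : pvF x ≠ -14 := fun h => hS ((pvF_eq_S x).mp h)
        rw [pvIdx, if_neg hnl, if_neg hS]
        rw [List.filter_cons, if_pos (by simpa using hnl), List.map_cons]
        rw [PySem.List.index?_cons_of_ne _ hne, ← ih]

theorem pvIdx_eq_index?_E (cs : List Char) :
    pvIdx 'E' cs = PySem.List.index? ((cs.filter (fun x => x != '\n')).map pvF) (-28) := by
  induction cs with
  | nil => simp [pvIdx]
  | cons x cs ih =>
    by_cases hnl : x = '\n'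
    · subst hnl; simpa [pvIdx] using ih
    · by_cases hE : x = 'E'
      · subst hE
        rw [pvIdx, if_neg (by decide), if_pos rfl]
        rw [List.filter_cons, if_pos (by decide), List.map_cons]
        have h28 : pvF 'E' = -28 := by decide
        rw [h28, PySem.List.index?_cons_self]
      · have hne : pvF x ≠ -28 := fun h => hE ((pvF_eq_E x).mp h)
        rw [pvIdx, if_neg hnl, if_neg hE]
        rw [List.filter_cons, if_pos (by simpa using hnl), List.map_cons]
        rw [PySem.List.index?_cons_of_ne _ hne, ← ih]

theorem pvFind_go_eq (cs : List Char) : ∀ k : Nat,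
    PySem.Chars.find.go ['\n'] cs k =
      match pvNL cs with
      | some j => ((k + j : Nat) : Int)
      | none => -1 := by
  induction cs with
  | nil => intro k; simp [PySem.Chars.find.go, pvNL]
  | cons x cs ih =>
    intro k
    by_cases hnl : x = '\n'
    · subst hnl; simp [PySem.Chars.find.go, List.isPrefixOf, pvNL]
    · rw [PySem.Chars.find.go]
      have hpre : List.isPrefixOf ['\n'] (x :: cs) = false := by
        simp only [List.isPrefixOf, Bool.and_eq_false_iff, beq_eq_false_iff_ne]
        exact Or.inl (fun h => hnl h.symm)
      rw [hpre, if_neg (by simp), ih (k + 1)]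
      rw [pvNL, if_neg hnl]
      cases pvNL cs with
      | none => simp
      | some j => simp only [Option.map_some]; push_cast; ring

theorem pvFind_eq (cs : List Char) :
    PySem.Chars.find cs ['\n'] =
      match pvNL cs with
      | some j => (j : Int)
      | none => -1 := by
  have := pvFind_go_eq cs 0
  simpa [PySem.Chars.find] using this

theorem pvG_eq (cs : List Char) : ∀ sF dF : Bool,
    pvG cs sF dF =
      pvSetOpt (pvSetOpt ((cs.filter (fun x => x != '\n')).map pvF)
        (if sF then none else pvIdx 'S' cs) 0)
        (if dF then none else pvIdx 'E' cs) 25 := by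
  induction cs with
  | nil => intro sF dF; cases sF <;> cases dF <;> simp [pvG, pvIdx, pvSetOpt]
  | cons x cs ih =>
    intro sF dF
    by_cases hnl : x = '\n'
    · subst hnl
      rw [pvG, if_pos rfl, ih sF dF]
      simp [pvIdx, List.filter_cons]
    · have hfil : ((x :: cs).filter (fun y => y != '\n')).map pvF
          = pvF x :: (cs.filter (fun y => y != '\n')).map pvF := by
        rw [List.filter_cons, if_pos (by simpa using hnl), List.map_cons]
      by_cases hS : x = 'S'
      · subst hS
        have hidxS : pvIdx 'S' ('S' :: cs) = some 0 := by
          rw [pvIdx, if_neg (by decide), if_pos rfl]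
        have hidxE : pvIdx 'E' ('S' :: cs) = (pvIdx 'E' cs).map (· + 1) := by
          rw [pvIdx, if_neg (by decide), if_neg (by decide)]
        cases sF with
        | false =>
          rw [pvG, if_neg (by decide), if_pos ⟨rfl, rfl⟩, ih true dF]
          cases dF <;>
            simp [hfil, hidxS, hidxE, pvSetOpt_cons_zero, pvSetOpt_cons_map, pvSetOpt_none]
        | true =>
          rw [pvG, if_neg (by decide), if_neg (by simp), if_neg (by simp), ih true dF]
          cases dF <;>
            simp [hfil, hidxS, hidxE, pvSetOpt_cons_zero, pvSetOpt_cons_map, pvSetOpt_none]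
      · by_cases hE : x = 'E'
        · subst hE
          have hidxE : pvIdx 'E' ('E' :: cs) = some 0 := by
            rw [pvIdx, if_neg (by decide), if_pos rfl]
          have hidxS : pvIdx 'S' ('E' :: cs) = (pvIdx 'S' cs).map (· + 1) := by
            rw [pvIdx, if_neg (by decide), if_neg (by decide)]
          cases dF with
          | false =>
            rw [pvG, if_neg (by decide), if_neg (by simp), if_pos ⟨rfl, rfl⟩, ih sF true]
            cases sF <;>
              simp [hfil, hidxS, hidxE, pvSetOpt_cons_zero, pvSetOpt_cons_map, pvSetOpt_none]
          | true =>
            rw [pvG, if_neg (by decide), if_neg (by simp), if_neg (by simp), ih sF true]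
            cases sF <;>
              simp [hfil, hidxS, hidxE, pvSetOpt_cons_zero, pvSetOpt_cons_map, pvSetOpt_none]
        · have hidxS : pvIdx 'S' (x :: cs) = (pvIdx 'S' cs).map (· + 1) := by
            rw [pvIdx, if_neg hnl, if_neg hS]
          have hidxE : pvIdx 'E' (x :: cs) = (pvIdx 'E' cs).map (· + 1) := by
            rw [pvIdx, if_neg hnl, if_neg hE]
          rw [pvG, if_neg hnl, if_neg (by simp [hS]), if_neg (by simp [hE]), ih sF dF]
          cases sF <;> cases dF <;>
            simp [hfil, hidxS, hidxE, pvSetOpt_cons_zero, pvSetOpt_cons_map, pvSetOpt_none]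

theorem pvLoop_spec (cs : List Char) : ∀ (i : Nat) (g : List Int) (w : Int)
    (s d : Option Nat),
    buildLoopB cs i g w s d =
      (g ++ pvG cs s.isSome d.isSome,
       (if w < 0 then
          match pvNL cs with
          | some j => ((i + j : Nat) : Int)
          | none => w
        else w),
       (match s with | some v => some v | none => (pvIdx 'S' cs).map (g.length + ·)),
       (match d with | some v => some v | none => (pvIdx 'E' cs).map (g.length + ·))) := by
  induction cs with
  | nil =>
    intro i g w s d
    cases s <;> cases d <;> simp [buildLoopB, pvG, pvIdx, pvNL]
  | cons x cs ih =>
    intro i g w s d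
    rw [buildLoopB]
    by_cases hnl : x = '\n'
    · subst hnl
      rw [if_pos rfl, ih]
      simp only [pvG, if_pos rfl, pvIdx, pvNL, Prod.mk.injEq]
      refine ⟨rfl, ?_, rfl, rfl⟩
      by_cases hw : w < 0
      · simp only [if_pos hw]
        rw [if_neg (not_lt.mpr (Int.natCast_nonneg i))]
        simp
      · simp only [if_neg hw]
    · rw [if_neg hnl]
      have hNL : pvNL (x :: cs) = (pvNL cs).map (· + 1) := by
        rw [pvNL, if_neg hnl]
      have hwgoal : (if w < 0 then
            match pvNL (x :: cs) with
            | some j => (((i : Nat) + j : Nat) : Int)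
            | none => w
          else w) =
          (if w < 0 then
            match pvNL cs with
            | some j => ((i + 1 + j : Nat) : Int)
            | none => w
          else w) := by
        rw [hNL]
        cases pvNL cs with
        | none => simp
        | some j =>
          by_cases hw : w < 0
          · rw [if_pos hw, if_pos hw]
            simp only [Option.map_some]
            push_cast; ring
          · rw [if_neg hw, if_neg hw]
      by_cases hS : x = 'S'
      · subst hS
        cases s with
        | none =>
          rw [if_pos (⟨rfl, rfl⟩ : ('S' : Char) = 'S' ∧ (none : Option Nat) = none), ih]
          simp only [Prod.mk.injEq]
          refine ⟨by simp [pvG, List.append_assoc, pvF], hwgoal.symm, by simp [pvIdx], ?_⟩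
          cases d with
          | some v => rfl
          | none => cases hx : pvIdx 'E' cs <;> simp [pvIdx, hx] <;> omega
        | some v =>
          rw [if_neg (by simp), if_neg (by simp), ih]
          simp only [Prod.mk.injEq]
          refine ⟨by simp [pvG, List.append_assoc, pvF], hwgoal.symm, by trivial, ?_⟩
          cases d with
          | some u => rfl
          | none => cases hx : pvIdx 'E' cs <;> simp [pvIdx, hx] <;> omega
      · by_cases hE : x = 'E'
        · subst hE
          cases d with
          | none =>
            rw [if_neg (by simp [hS]),
              if_pos (⟨rfl, rfl⟩ : ('E' : Char) = 'E' ∧ (none : Option Nat) = none), ih]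
            simp only [Prod.mk.injEq]
            refine ⟨by simp [pvG, List.append_assoc, pvF], hwgoal.symm, ?_, by simp [pvIdx]⟩
            cases s with
            | some v => rfl
            | none => cases hx : pvIdx 'S' cs <;> simp [pvIdx, hx] <;> omega
          | some v =>
            rw [if_neg (by simp [hS]), if_neg (by simp), ih]
            simp only [Prod.mk.injEq]
            refine ⟨by simp [pvG, List.append_assoc, pvF], hwgoal.symm, ?_, by trivial⟩
            cases s with
            | some u => rfl
            | none => cases hx : pvIdx 'S' cs <;> simp [pvIdx, hx] <;> omega
        · rw [if_neg (by simp [hS]), if_neg (by simp [hE]), ih]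
          simp only [Prod.mk.injEq]
          refine ⟨by simp [pvG, hnl, hS, hE, List.append_assoc, pvF], hwgoal.symm, ?_, ?_⟩
          · cases s with
            | some v => rfl
            | none => cases hx : pvIdx 'S' cs <;> simp [pvIdx, hnl, hS, hE, hx] <;> omega
          · cases d with
            | some v => rfl
            | none => cases hx : pvIdx 'E' cs <;> simp [pvIdx, hnl, hS, hE, hx] <;> omega

theorem pvMem_filter_S (cs : List Char) (h : 'S' ∈ cs) :
    (-14 : Int) ∈ (cs.filter (fun x => x != '\n')).map pvF := by
  refine List.mem_map.mpr ⟨'S', ?_, by decide⟩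
  exact List.mem_filter.mpr ⟨h, by decide⟩

theorem pvMem_filter_E (cs : List Char) (h : 'E' ∈ cs) :
    (-28 : Int) ∈ (cs.filter (fun x => x != '\n')).map pvF := by
  refine List.mem_map.mpr ⟨'E', ?_, by decide⟩
  exact List.mem_filter.mpr ⟨h, by decide⟩

-- ===== VERDICT (by name: the statement is the Claim_ definition above) =====
theorem parse_spec : Claim_equal_parse := by
  intro content _ hpre
  obtain ⟨hS, hE⟩ := hpre
  show parse content = parse_alt content
  obtain ⟨s0, hs0⟩ := Option.isSome_iff_exists.mp
    ((PySem.List.index?_isSome_iff _ _).mpr (pvMem_filter_S content.toList hS))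
  obtain ⟨d0, hd0⟩ := Option.isSome_iff_exists.mp
    ((PySem.List.index?_isSome_iff _ _).mpr (pvMem_filter_E content.toList hE))
  have hidxS : pvIdx 'S' content.toList = some s0 := by rw [pvIdx_eq_index?_S, hs0]
  have hidxE : pvIdx 'E' content.toList = some d0 := by rw [pvIdx_eq_index?_E, hd0]
  have hG : pvG content.toList false false =
      ((((content.toList.filter (fun x => x != '\n')).map pvF).set s0 0).set d0 25) := by
    rw [pvG_eq content.toList false false, if_neg (by simp), if_neg (by simp), hidxS, hidxE]
    rfl
  have hw : PySem.Str.find content "\n" =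
      (match pvNL content.toList with | some j => (j : Int) | none => -1) := by
    rw [show PySem.Str.find content "\n" = PySem.Chars.find content.toList ['\n'] from by
      rw [PySem.Str.find_eq]; simp, pvFind_eq]
  unfold parse parse_alt
  rw [pvLoop_spec]
  simp only [show (fun (x : Char) => ((x.toNat : Int) - 97)) = pvF from rfl]
  simp only [Option.isSome_none, hidxS, hidxE, Option.map_some, List.nil_append,
    List.length_nil, Nat.zero_add, hs0, hd0, hG, hw]
  cases hNL : pvNL content.toList <;> simp
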